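-- pv_equiv track=rewrite | github.com/JesterArc/WordleClone | Wordle/src/Logic/Wordle.py | mark_repetitions
-- ===== SOURCE A (Python) =====
-- def mark_repetitions(word: str) -> list[str]:
--     """Marks each repeating letter in word with a number of times it appeared before
--
--     Args:
--         word (str): a string of letters
--
--     Returns:
--         list[str] : list of letters
--     """
--     letters = list(word)
--     count_repetitions = dict()
--     for pos, letter in enumerate(letters):
--         if letter == "-":
--             pass
--         letters[pos] = f"{letter}{count_repetitions.get(letter, '')}"
--         if letter not in count_repetitions:
--             count_repetitions[letter] = 1
--         else:
--             count_repetitions[letter] += 1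
--     return letters
-- ===== SOURCE B (Python) =====
-- def mark_repetitions(word: str) -> list[str]:
--     """Marks each repeating letter in word with a number of times it appeared before.
--
--     Grouping/scatter strategy: one pass per distinct letter, writing that
--     letter's annotations into a preallocated output list by index.
--     """
--     out = [""] * len(word)
--     for c in dict.fromkeys(word):
--         k = 0
--         for i, ch in enumerate(word):
--             if ch == c:
--                 out[i] = f"{c}{k or ''}"
--                 k += 1
--     return out
-- ===== Notes on version B (the rewrite author's own statement) =====
-- stated objective: alternative
-- what changed: B replaces A's single left-to-right pass with a running-count dict by a grouping/scatter scheme: it preallocates the output list and makes one full pass per distinct letter (dict.fromkeys), writing that letter's annotations into the output by index assignment.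
import Mathlib
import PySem

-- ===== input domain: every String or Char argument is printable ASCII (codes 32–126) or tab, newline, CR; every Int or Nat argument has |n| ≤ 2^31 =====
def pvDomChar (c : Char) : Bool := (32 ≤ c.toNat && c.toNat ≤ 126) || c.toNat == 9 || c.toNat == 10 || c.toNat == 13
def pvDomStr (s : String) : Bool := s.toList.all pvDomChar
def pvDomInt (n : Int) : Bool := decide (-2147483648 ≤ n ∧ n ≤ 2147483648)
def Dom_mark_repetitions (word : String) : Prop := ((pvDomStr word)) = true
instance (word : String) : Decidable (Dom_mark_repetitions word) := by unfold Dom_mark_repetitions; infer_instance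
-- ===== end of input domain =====

-- B replaces A's single pass with a running-count dict by a grouping/scatter scheme:
-- one full pass per distinct letter, writing its annotations into a preallocated output
-- list by index (objective: alternative).

-- ===== PORT A =====
-- one loop step of A: read the dict for the f-string ('' when absent), then update the count
def markStepA (st : List String × PySem.Dict Char Int) (letter : Char) :
    List String × PySem.Dict Char Int :=
  match st.2.get? letter with
  | none => (st.1 ++ [String.ofList [letter]], st.2.insert letter 1)
  | some n => (st.1 ++ [String.ofList (letter :: PySem.Int.toChars n)], st.2.insert letter (n + 1))

def mark_repetitions (word : String) : List String :=
  let letters := word.toList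
  (letters.foldl markStepA ([], PySem.Dict.empty)).1

-- ===== PORT B =====
-- f"{c}{k or ''}"
def annotB (c : Char) (k : Int) : String :=
  if k = 0 then String.ofList [c] else String.ofList (c :: PySem.Int.toChars k)

-- inner loop of Source B: 'for i, ch in enumerate(word): if ch == c: out[i] = …; k += 1'
-- (enumerate indices are nonnegative, so Nat indexing / List.set is exact here)
def innerB (c : Char) : List Char → Nat → Int → List String → List String
  | [], _, _, out => out
  | ch :: rest, i, k, out =>
      if ch = c then innerB c rest (i + 1) (k + 1) (out.set i (annotB c k))
      else innerB c rest (i + 1) k out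

def mark_repetitions_alt (word : String) : List String :=
  let cs := word.toList
  let out0 := List.replicate cs.length ""
  (PySem.List.dedup cs).foldl (fun out c => innerB c cs 0 0 out) out0

-- ===== PRECONDITION & SPEC =====
def Spec_mark_repetitions (word : String) (out : List String) : Prop := out = mark_repetitions_alt word
instance (word : String) (out : List String) : Decidable (Spec_mark_repetitions word out) := by unfold Spec_mark_repetitions; infer_instance

-- ===== CLAIM (what is proved, stated in full; the proofs are below) =====
def Claim_equal_mark_repetitions : Prop := ∀ (word : String), Dom_mark_repetitions word → Spec_mark_repetitions word (mark_repetitions word)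

-- ===== LEMMAS AND PROOFS =====

-- the annotated letter for c after prefix pre, and the whole annotated list built left to right
def pvOut (pre : List Char) (c : Char) : String :=
  if pre.count c = 0 then String.ofList [c] else String.ofList (c :: PySem.Int.toChars (pre.count c))

def pvMk : List Char → List Char → List String
  | _, [] => []
  | pre, c :: cs => pvOut pre c :: pvMk (pre ++ [c]) cs

lemma markA_loop (cs : List Char) : ∀ (pre : List Char) (acc : List String)
    (d : PySem.Dict Char Int),
    (∀ ch, d.get? ch = if pre.count ch = 0 then none else some ((pre.count ch : Int))) →
    (cs.foldl markStepA (acc, d)).1 = acc ++ pvMk pre cs := by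
  induction cs with
  | nil => intro pre acc d _; simp [pvMk]
  | cons c cs ih =>
    intro pre acc d hd
    have hstep : markStepA (acc, d) c =
        (acc ++ [pvOut pre c],
         if pre.count c = 0 then d.insert c 1 else d.insert c ((pre.count c : Int) + 1)) := by
      by_cases h : pre.count c = 0 <;>
        simp [markStepA, hd c, h, pvOut]
    have hinv : ∀ ch,
        (if pre.count c = 0 then d.insert c 1 else d.insert c ((pre.count c : Int) + 1)).get? ch =
        if (pre ++ [c]).count ch = 0 then none else some (((pre ++ [c]).count ch : Int)) := by
      intro ch
      by_cases hch : ch = c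
      · subst hch
        by_cases h : pre.count ch = 0 <;>
          simp [h, PySem.Dict.get?_insert_self, List.count_append]
      · have hcc : c ≠ ch := fun h => hch h.symm
        by_cases h : pre.count c = 0 <;>
          simp [h, PySem.Dict.get?_insert_of_ne _ _ hch, hd ch, List.count_append, hcc]
    calc ((c :: cs).foldl markStepA (acc, d)).1
        = (cs.foldl markStepA (markStepA (acc, d) c)).1 := by simp [List.foldl_cons]
      _ = (acc ++ [pvOut pre c]) ++ pvMk (pre ++ [c]) cs := by rw [hstep]; exact ih _ _ _ hinv
      _ = acc ++ pvMk pre (c :: cs) := by simp [pvMk]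

lemma pvMk_getElem? (cs : List Char) : ∀ (pre : List Char) (j : Nat),
    (pvMk pre cs)[j]? = (cs[j]?).map (fun ch => pvOut (pre ++ cs.take j) ch) := by
  induction cs with
  | nil => intro pre j; simp [pvMk]
  | cons c cs ih =>
    intro pre j
    cases j with
    | zero => simp [pvMk]
    | succ j => simpa [pvMk, List.append_assoc] using ih (pre ++ [c]) j

lemma annotB_count (pre : List Char) (c : Char) :
    annotB c ((pre.count c : Int)) = pvOut pre c := by
  by_cases h : pre.count c = 0 <;> simp [annotB, pvOut, h]

lemma innerB_getElem? (c : Char) : ∀ (rest pre : List Char) (out : List String),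
    out.length = (pre ++ rest).length →
    ∀ j, (innerB c rest pre.length ((pre.count c : Int)) out)[j]? =
      if pre.length ≤ j ∧ (pre ++ rest)[j]? = some c then
        some (annotB c ((((pre ++ rest).take j).count c : Int)))
      else out[j]? := by
  intro rest
  induction rest with
  | nil =>
    intro pre out hlen j
    simp only [innerB, List.append_nil]
    rcases le_or_gt pre.length j with hle | hlt
    · have h0 : pre[j]? = none := by
        rw [List.getElem?_eq_none_iff]; omega
      simp [h0]
    · have : ¬ pre.length ≤ j := by omega
      simp [this]
  | cons ch rest ih =>
    intro pre out hlen j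
    by_cases hch : ch = c
    · subst hch
      have hk : ((pre.count ch : Int)) + 1 = (((pre ++ [ch]).count ch : Int)) := by
        simp [List.count_append]
      have hl : pre.length + 1 = (pre ++ [ch]).length := by simp
      have hfull : (pre ++ [ch]) ++ rest = pre ++ ch :: rest := by simp
      have hlen' : (out.set pre.length (annotB ch ((pre.count ch : Int)))).length
          = ((pre ++ [ch]) ++ rest).length := by simp [hfull]; simpa using hlen
      have hrec := ih (pre ++ [ch]) (out.set pre.length (annotB ch ((pre.count ch : Int)))) hlen' j
      simp only [innerB, if_true]
      rw [hl, hk, hrec, hfull]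
      have hplen : pre.length < out.length := by simp at hlen; omega
      by_cases hj : j = pre.length
      · subst hj
        have htake : (pre ++ ch :: rest).take pre.length = pre := by
          simp
        rw [if_neg (by simp), if_pos ⟨le_refl _, by simp⟩, htake]
        simp [hplen]
      · have hset : (out.set pre.length (annotB ch ((pre.count ch : Int))))[j]? = out[j]? := by
          rw [List.getElem?_set, if_neg (fun h : pre.length = j => hj h.symm)]
        rw [hset]
        refine if_congr (and_congr_left' ?_) rfl rfl
        simp only [List.length_append, List.length_cons, List.length_nil]
        omega
    · have hk : ((pre.count c : Int)) = (((pre ++ [ch]).count c : Int)) := by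
        simp [List.count_append, hch]
      have hl : pre.length + 1 = (pre ++ [ch]).length := by simp
      have hfull : (pre ++ [ch]) ++ rest = pre ++ ch :: rest := by simp
      have hlen' : out.length = ((pre ++ [ch]) ++ rest).length := by
        rw [hfull]; simpa using hlen
      have hrec := ih (pre ++ [ch]) out hlen' j
      simp only [innerB, if_neg hch]
      rw [hl, hk, hrec, hfull]
      by_cases hj : j = pre.length
      · subst hj
        rw [if_neg (by simp), if_neg (by simp [hch])]
      · refine if_congr (and_congr_left' ?_) rfl rfl
        simp only [List.length_append, List.length_cons, List.length_nil]
        omega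

lemma innerB_length (c : Char) : ∀ (rest : List Char) (i : Nat) (k : Int) (out : List String),
    (innerB c rest i k out).length = out.length := by
  intro rest
  induction rest with
  | nil => intro i k out; simp [innerB]
  | cons ch rest ih =>
    intro i k out
    by_cases h : ch = c <;> simp [innerB, h, ih]

lemma outerB_getElem? (cs : List Char) : ∀ (ds : List Char) (out : List String),
    out.length = cs.length →
    ∀ j, (ds.foldl (fun o c => innerB c cs 0 0 o) out)[j]? =
      match cs[j]? with
      | some ch => if ch ∈ ds then some (annotB ch (((cs.take j).count ch : Int))) else out[j]?
      | none => out[j]? := by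
  intro ds
  induction ds with
  | nil => intro out _ j; cases cs[j]? <;> simp
  | cons d ds ih =>
    intro out hlen j
    have hin := innerB_getElem? d cs [] out (by simpa using hlen) j
    simp only [List.count_nil, Int.natCast_zero, List.nil_append, List.length_nil,
      Nat.zero_le, true_and] at hin
    have hlen' : (innerB d cs 0 0 out).length = cs.length := by
      rw [innerB_length]; exact hlen
    have := ih (innerB d cs 0 0 out) hlen' j
    simp only [List.foldl_cons]
    rw [this]
    cases hcs : cs[j]? with
    | none => simp [hin, hcs]
    | some ch =>
      by_cases hds : ch ∈ ds
      · simp [hds]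
      · by_cases hd : ch = d
        · subst hd
          simp [hds, hin, hcs]
        · have : ¬ (cs[j]? = some d) := by simp [hcs, hd]
          simp [hds, hd, hin, hcs]

-- ===== VERDICT (by name: the statement is the Claim_ definition above) =====
theorem mark_repetitions_spec : Claim_equal_mark_repetitions := by
  intro word _
  unfold Spec_mark_repetitions mark_repetitions mark_repetitions_alt
  have hA := markA_loop word.toList [] [] PySem.Dict.empty (by
    intro ch; simp [PySem.Dict.get?, PySem.Dict.empty])
  simp only [List.nil_append] at hA
  rw [hA]
  apply List.ext_getElem?
  intro j
  rw [pvMk_getElem?,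
      outerB_getElem? word.toList (PySem.List.dedup word.toList)
        (List.replicate word.toList.length "") (by simp) j]
  cases hcs : word.toList[j]? with
  | none =>
    have hj : word.toList.length ≤ j := List.getElem?_eq_none_iff.mp hcs
    simp only [Option.map_none, List.getElem?_replicate]
    rw [if_neg (by simpa using Nat.not_lt.mpr hj)]
  | some ch =>
    have hmem : ch ∈ word.toList := List.mem_of_getElem? hcs
    simp [hmem, annotB_count]
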